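-- pv_equiv track=rewrite | github.com/GeMixl/AoC2022 | day03/day03.py | solve_part_ii
-- ===== SOURCE A (Python) =====
-- from collections import deque
-- from string import ascii_lowercase, ascii_uppercase
--
-- def get_item_value(item: str) -> int:
--     values = ascii_lowercase + ascii_uppercase
--     return next(i+1 for i, letter in enumerate(values) if letter == item)
--
-- def solve_part_ii(input):
--     elf_queue = deque(input)
--     sticker_attachment_effort = 0
--     while len(elf_queue) > 0:
--         current_elf = elf_queue.popleft()
--         other_elfs = [elf_queue.popleft(), elf_queue.popleft()]
--         for i in "".join(set(current_elf)):
--             badge = [elf for elf in other_elfs if i in elf]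
--             if len(badge) == 2:
--                 sticker_attachment_effort += get_item_value(i)
--     return sticker_attachment_effort
-- ===== SOURCE B (Python) =====
-- from string import ascii_lowercase, ascii_uppercase
--
-- def solve_part_ii(input):
--     it = iter(input)
--     groups = []
--     for a in it:
--         groups.append((a, next(it), next(it)))
--     total = 0
--     for idx, letter in enumerate(ascii_lowercase + ascii_uppercase):
--         for a, b, c in groups:
--             if letter in a and letter in b and letter in c:
--                 total += idx + 1
--     return total
-- ===== Notes on version B (the rewrite author's own statement) =====
-- stated objective: alternative
-- what changed: B inverts the loop structure: it chunks the input into triples once by popping an iterator, then loops over the 52-letter alphabet as the OUTER loop with the triples inner, adding idx+1 for every triple containing that letter in all three lines; A's per-character scans over the other two elves, the badge list and the enumerate search in get_item_value all disappear.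
import Mathlib
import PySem

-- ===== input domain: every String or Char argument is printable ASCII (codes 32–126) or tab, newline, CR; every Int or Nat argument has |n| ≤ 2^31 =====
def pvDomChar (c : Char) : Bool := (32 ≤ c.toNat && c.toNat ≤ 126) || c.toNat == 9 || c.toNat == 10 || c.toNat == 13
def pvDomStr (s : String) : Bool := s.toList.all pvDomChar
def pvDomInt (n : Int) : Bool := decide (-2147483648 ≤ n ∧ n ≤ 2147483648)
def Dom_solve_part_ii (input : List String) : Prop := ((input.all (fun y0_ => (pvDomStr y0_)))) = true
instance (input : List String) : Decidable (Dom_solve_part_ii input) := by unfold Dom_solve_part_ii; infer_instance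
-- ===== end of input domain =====

-- B inverts the loop structure: it chunks the input into triples once, then loops over the
-- 52-letter alphabet as the OUTER loop, adding idx+1 for each triple containing that letter
-- in all three lines (objective: alternative; no speed claim).

-- ===== PORT A =====
-- values = ascii_lowercase + ascii_uppercase
def pyLetters : List Char := "abcdefghijklmnopqrstuvwxyzABCDEFGHIJKLMNOPQRSTUVWXYZ".toList

-- next(i+1 for i, letter in enumerate(values) if letter == item); 0 stands for the
-- StopIteration Python raises on a non-letter (those inputs are outside Pre_).
def get_item_value (item : Char) : Int :=
  match (PySem.List.enumerate pyLetters).find? (fun p => p.2 == item) with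
  | some p => p.1 + 1
  | none => 0

-- the while-loop over the deque; fewer than 3 remaining = IndexError (outside Pre_), result 0 junk.
-- `i in elf` with i a 1-char string is exactly char membership in elf's characters.
def solveALoop : List String → Int → Int
  | a :: b :: c :: rest, acc =>
      let inner := (PySem.Set.ofList a.toList).foldl (fun s i =>
        let badge := [b, c].filter (fun elf => elf.toList.contains i)
        if badge.length == 2 then s + get_item_value i else s) acc
      solveALoop rest inner
  | _ :: _, acc => acc
  | [], acc => acc

def solve_part_ii (input : List String) : Int := solveALoop input 0

-- ===== PORT B =====
-- groups = list(zip(it, it, it)): triples in order, any leftover lines dropped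
def chunk3 : List String → List (String × String × String)
  | a :: b :: c :: rest => (a, b, c) :: chunk3 rest
  | _ => []

-- letter in a and letter in b and letter in c
def hasAll (g : String × String × String) (ch : Char) : Bool :=
  g.1.toList.contains ch && g.2.1.toList.contains ch && g.2.2.toList.contains ch

def solve_part_ii_alt (input : List String) : Int :=
  let groups := chunk3 input
  (PySem.List.enumerate pyLetters).foldl
    (fun total p => groups.foldl
      (fun total g => if hasAll g p.2 then total + (p.1 + 1) else total) total) 0

-- ===== PRECONDITION & SPEC =====
-- Pre_ excludes exactly the inputs on which Python A raises: a list whose length is not a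
-- multiple of 3 (IndexError popping an empty deque) and triples whose common character is
-- not an ASCII letter (StopIteration in get_item_value).
def preB : List String → Bool
  | a :: b :: c :: rest =>
      a.toList.all (fun ch =>
        !(b.toList.contains ch && c.toList.contains ch) || ch.isAlpha) && preB rest
  | [] => true
  | _ => false

def Pre_solve_part_ii (input : List String) : Prop := preB input = true
instance (input : List String) : Decidable (Pre_solve_part_ii input) := by
  unfold Pre_solve_part_ii; infer_instance

def pvWitness_solve_part_ii : List String := ["ab", "bc", "bd"]

def Spec_solve_part_ii (input : List String) (out : Int) : Prop := out = solve_part_ii_alt input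
instance (input : List String) (out : Int) : Decidable (Spec_solve_part_ii input out) := by
  unfold Spec_solve_part_ii; infer_instance

-- ===== CLAIM (what is proved, stated in full; the proofs are below) =====
def Claim_equal_solve_part_ii : Prop := ∀ (input : List String), Dom_solve_part_ii input → Pre_solve_part_ii input → Spec_solve_part_ii input (solve_part_ii input)

-- ===== LEMMAS AND PROOFS =====

-- the condition A's inner loop tests (badge length 2)
def condBC (g : String × String × String) (i : Char) : Bool :=
  g.2.1.toList.contains i && g.2.2.toList.contains i

-- A's contribution of one triple
def perA (g : String × String × String) : Int :=
  (((PySem.Set.ofList g.1.toList).filter (condBC g)).map get_item_value).sum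

-- B's contribution of one triple (after summing the alphabet loop)
def perBsum (g : String × String × String) : Int :=
  ((PySem.List.enumerate pyLetters).map
    (fun p => if hasAll g p.2 then p.1 + 1 else (0 : Int))).sum

lemma foldl_ite_add {α : Type} (l : List α) (c : α → Bool) (v : α → Int) (a : Int) :
    l.foldl (fun t x => if c x then t + v x else t) a
      = a + (l.map (fun x => if c x then v x else 0)).sum := by
  have h : (fun (t : Int) (x : α) => if c x then t + v x else t)
      = (fun t x => t + (if c x then v x else 0)) := by
    funext t x; split <;> simp
  rw [h, PySem.List.foldl_add]

lemma sum_swap {α β : Type} (l1 : List α) (l2 : List β) (f : α → β → Int) :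
    (l1.map (fun x => (l2.map (fun y => f x y)).sum)).sum
      = (l2.map (fun y => (l1.map (fun x => f x y)).sum)).sum := by
  induction l1 with
  | nil => simp
  | cons x xs ih =>
      simp only [List.map_cons, List.sum_cons, ih, PySem.List.sum_map_add_int]

lemma sum_ite_filter {α : Type} (l : List α) (c : α → Bool) (v : α → Int) :
    (l.map (fun x => if c x then v x else 0)).sum = ((l.filter c).map v).sum := by
  induction l with
  | nil => rfl
  | cons x xs ih =>
      by_cases h : c x = true <;> simp [h, ih]

lemma B_eq_sum (l : List String) :
    solve_part_ii_alt l = ((chunk3 l).map perBsum).sum := by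
  unfold solve_part_ii_alt
  have h1 : ∀ (ps : List (Int × Char)) (acc : Int),
      ps.foldl (fun total p => (chunk3 l).foldl
        (fun total g => if hasAll g p.2 then total + (p.1 + 1) else total) total) acc
        = acc + (ps.map (fun p => ((chunk3 l).map
            (fun g => if hasAll g p.2 then p.1 + 1 else (0 : Int))).sum)).sum := by
    intro ps
    induction ps with
    | nil => intro acc; simp
    | cons p ps ih =>
        intro acc
        simp only [List.foldl_cons, ih, List.map_cons, List.sum_cons]
        rw [foldl_ite_add]
        ring
  rw [h1, sum_swap]
  simp only [zero_add]
  rfl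

lemma get_item_value_enum (p : Int × Char) (hp : p ∈ PySem.List.enumerate pyLetters) :
    get_item_value p.2 = p.1 + 1 := by
  have hall : ((PySem.List.enumerate pyLetters).all
      (fun p => get_item_value p.2 == p.1 + 1)) = true := by decide
  simpa using (List.all_eq_true.mp hall) p hp

lemma mem_pyLetters_of_isAlpha (c : Char) (h : c.isAlpha = true) : c ∈ pyLetters := by
  have hn : (65 ≤ c.toNat ∧ c.toNat ≤ 90) ∨ (97 ≤ c.toNat ∧ c.toNat ≤ 122) := by
    simp [Char.isAlpha, Char.isUpper, Char.isLower, UInt32.le_iff_toNat_le] at h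
    rcases h with h | h
    · exact Or.inl ⟨h.1, h.2⟩
    · exact Or.inr ⟨h.1, h.2⟩
  have hofNat : ∀ n ∈ (List.range' 65 26 ++ List.range' 97 26), Char.ofNat n ∈ pyLetters := by
    decide
  have hc : c.toNat ∈ (List.range' 65 26 ++ List.range' 97 26) := by
    simp [List.mem_append, List.mem_range'_1]
    omega
  have := hofNat _ hc
  rwa [Char.ofNat_toNat c] at this

-- per-triple: B's alphabet-loop sum equals A's distinct-chars-of-a sum, when every
-- common char of the triple is a letter
lemma per_triple (g : String × String × String)
    (H : ∀ i ∈ g.1.toList, condBC g i = true → i.isAlpha = true) :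
    perBsum g = perA g := by
  unfold perBsum perA
  rw [sum_ite_filter]
  have hval : (((PySem.List.enumerate pyLetters).filter (fun p => hasAll g p.2)).map
      (fun p => p.1 + 1)).sum
      = (((PySem.List.enumerate pyLetters).filter (fun p => hasAll g p.2)).map
      (fun p => get_item_value p.2)).sum := by
    apply congrArg
    apply List.map_congr_left
    intro p hp
    exact (get_item_value_enum p (List.mem_of_mem_filter hp)).symm
  rw [hval]
  have hmapmap : (((PySem.List.enumerate pyLetters).filter (fun p => hasAll g p.2)).map
      (fun p => get_item_value p.2))
      = ((((PySem.List.enumerate pyLetters).filter (fun p => hasAll g p.2)).map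
          (fun p => p.2)).map get_item_value) := by
    simp [List.map_map, Function.comp]
  rw [hmapmap]
  -- the filtered snd-projection of the enumerate is a permutation of A's filtered set
  have hperm : (((PySem.List.enumerate pyLetters).filter (fun p => hasAll g p.2)).map
      (fun p => p.2)).Perm ((PySem.Set.ofList g.1.toList).filter (condBC g)) := by
    rw [List.perm_ext_iff_of_nodup]
    · intro x
      constructor
      · intro hx
        obtain ⟨p, hp, hpx⟩ := List.mem_map.mp hx
        obtain ⟨hpmem, hpcond⟩ := List.mem_filter.mp hp
        subst hpx
        have hall : hasAll g p.2 = true := hpcond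
        unfold hasAll at hall
        simp only [Bool.and_eq_true, List.contains_eq_mem, decide_eq_true_eq] at hall
        obtain ⟨⟨ha1, ha2⟩, ha3⟩ := hall
        apply List.mem_filter.mpr
        refine ⟨?_, ?_⟩
        · rw [PySem.Set.mem_ofList]; exact ha1
        · unfold condBC; simp [ha2, ha3]
      · intro hx
        obtain ⟨hxs, hxc⟩ := List.mem_filter.mp hx
        have hxa : x ∈ g.1.toList := (PySem.Set.mem_ofList _ _).mp hxs
        have halpha : x.isAlpha = true := H x hxa hxc
        have hxL : x ∈ pyLetters := mem_pyLetters_of_isAlpha x halpha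
        unfold condBC at hxc
        simp only [Bool.and_eq_true, List.contains_eq_mem, decide_eq_true_eq] at hxc
        -- find the enumerate pair whose snd is x
        obtain ⟨k, hk, hkx⟩ := List.mem_iff_getElem.mp hxL
        refine List.mem_map.mpr ⟨((0 + k : Int), x), ?_, rfl⟩
        apply List.mem_filter.mpr
        constructor
        · apply (PySem.List.mem_enumerate_iff _ _ _).mpr
          exact ⟨k, by simpa using hk, by simp [hkx]⟩
        · unfold hasAll
          simp [hxa, hxc.1, hxc.2]
    · -- nodup of the snd-projection: enumerate of a nodup list
      have hlnd : pyLetters.Nodup := by decide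
      have : (((PySem.List.enumerate pyLetters).filter (fun p => hasAll g p.2)).map
          (fun p => p.2)).Sublist (((PySem.List.enumerate pyLetters)).map (fun p => p.2)) :=
        List.Sublist.map _ List.filter_sublist
      have hnd2 : (((PySem.List.enumerate pyLetters)).map (fun (p : Int × Char) => p.2)).Nodup := by
        rw [PySem.List.map_snd_enumerate]; exact hlnd
      exact this.nodup hnd2
    · exact ((PySem.Set.nodup_ofList g.1.toList).filter _)
  exact (hperm.map get_item_value).sum_eq

lemma badge_len (b c : String) (i : Char) :
    (([b, c].filter (fun elf => elf.toList.contains i)).length == 2)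
      = (b.toList.contains i && c.toList.contains i) := by
  by_cases hb : i ∈ b.toList <;> by_cases hc : i ∈ c.toList <;>
    simp [List.filter, hb, hc]

lemma A_eq_sum : ∀ (l : List String) (acc : Int), preB l = true →
    solveALoop l acc = acc + ((chunk3 l).map perA).sum := by
  intro l acc
  induction l, acc using solveALoop.induct with
  | case2 x acc => intro h; rcases x with ⟨⟩ | ⟨a, ⟨⟩ | ⟨b, ⟨⟩ | t⟩⟩ <;> simp_all [preB]
  | case3 acc => intro _; simp [solveALoop, chunk3]
  | case1 a b c rest acc inner ih =>
      intro h
      simp only [preB, Bool.and_eq_true] at h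
      obtain ⟨_, hrest⟩ := h
      have hfun : (fun (s : Int) (i : Char) =>
          let badge := [b, c].filter (fun elf => elf.toList.contains i)
          if badge.length == 2 then s + get_item_value i else s)
        = (fun (s : Int) (i : Char) =>
          if condBC (a, b, c) i then s + get_item_value i else s) := by
        funext s i
        simp only [badge_len, condBC]
        rfl
      have hinner : inner = acc + perA (a, b, c) := by
        have hdef : inner = List.foldl
            (fun (s : Int) (i : Char) =>
              let badge := [b, c].filter (fun elf => elf.toList.contains i)
              if badge.length == 2 then s + get_item_value i else s) acc
            (PySem.Set.ofList a.toList) := rfl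
        rw [hdef, hfun, foldl_ite_add, sum_ite_filter]
        rfl
      rw [solveALoop]
      simp only
      rw [show (let inner := (PySem.Set.ofList a.toList).foldl (fun s i =>
        let badge := [b, c].filter (fun elf => elf.toList.contains i)
        if badge.length == 2 then s + get_item_value i else s) acc
        solveALoop rest inner) = solveALoop rest inner from rfl]
      rw [ih hrest, hinner]
      simp [chunk3]
      ring

-- preB gives the per-triple hypothesis for every chunk
lemma preB_chunks : ∀ (l : List String), preB l = true →
    ∀ g ∈ chunk3 l, ∀ i ∈ g.1.toList, condBC g i = true → i.isAlpha = true := by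
  intro l
  induction l using chunk3.induct with
  | case1 a b c rest ih =>
      intro h g hg i hi hc
      simp only [preB, Bool.and_eq_true] at h
      obtain ⟨ha, hrest⟩ := h
      simp only [chunk3, List.mem_cons] at hg
      rcases hg with hg | hg
      · subst hg
        unfold condBC at hc
        have := (List.all_eq_true.mp ha) i hi
        simp only at hc
        simp at this
        have hcm : i ∈ b.toList ∧ i ∈ c.toList := by
          simpa using hc
        simp [hcm.1, hcm.2] at this
        exact this
      · exact ih hrest g hg i hi hc
  | case2 x hx =>
      intro _ g hg
      rw [chunk3] at hg
      · simp at hg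
      · exact hx

-- ===== VERDICT (by name: the statement is the Claim_ definition above) =====
theorem solve_part_ii_spec : Claim_equal_solve_part_ii := by
  intro input _ hpre
  unfold Spec_solve_part_ii solve_part_ii
  rw [A_eq_sum input 0 hpre, B_eq_sum]
  rw [List.map_congr_left (fun g hg => per_triple g (preB_chunks input hpre g hg))]
  ring
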